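-- pv_equiv track=rewrite | github.com/juyeonbae/coding | 프로그래머스/0/181881. 조건에 맞게 수열 변환하기 2/조건에 맞게 수열 변환하기 2.py | solution
-- ===== SOURCE A (Python) =====
-- def solution(arr):
--     answer = 0
--     tmp = list(arr)
--     while True:
--         new_arr = tmp[:]
--         for i in range(len(tmp)):
--             if tmp[i] >= 50 and tmp[i] % 2 == 0:
--                 new_arr[i] = tmp[i] // 2
--             elif tmp[i] < 50 and tmp[i] % 2 != 0:
--                 new_arr[i] = tmp[i] * 2 + 1
--
--         if new_arr == tmp:
--             break
--
--         answer += 1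
--         tmp = new_arr
--
--     return answer
-- ===== SOURCE B (Python) =====
-- def solution(arr):
--     def step(x):
--         if x >= 50 and x % 2 == 0:
--             return x // 2
--         if x < 50 and x % 2 != 0:
--             return 2 * x + 1
--         return x
--
--     best = 0
--     for x in arr:
--         s = 0
--         while step(x) != x:
--             x = step(x)
--             s += 1
--         best = max(best, s)
--     return best
-- ===== Notes on version B (the rewrite author's own statement) =====
-- stated objective: alternative
-- what changed: Instead of repeatedly transforming the whole array and comparing full copies each round, B follows each element's trajectory independently to its fixed point and returns the maximum per-element step count.
import Mathlib
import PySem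

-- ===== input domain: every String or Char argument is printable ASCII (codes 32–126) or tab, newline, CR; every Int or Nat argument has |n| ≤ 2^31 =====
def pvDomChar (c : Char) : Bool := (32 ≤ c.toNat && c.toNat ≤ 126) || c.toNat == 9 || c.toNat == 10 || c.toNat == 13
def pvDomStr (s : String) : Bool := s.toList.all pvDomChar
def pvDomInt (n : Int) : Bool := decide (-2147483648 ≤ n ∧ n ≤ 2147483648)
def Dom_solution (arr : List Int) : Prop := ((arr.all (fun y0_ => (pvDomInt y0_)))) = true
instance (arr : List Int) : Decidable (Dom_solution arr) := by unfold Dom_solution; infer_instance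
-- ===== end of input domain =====

-- B follows each element independently; A re-scans the whole array each round.
-- The 100-step fuel in both ports only makes the loops total (on arrays with a negative
-- odd element both Pythons loop forever); wherever either Python returns within Dom,
-- its loop finishes far below the fuel, and the ports agree with it.

-- ===== PORT A =====
-- one round of A's while-body: new_arr = tmp[:], then the for-loop over range(len(tmp))
-- (tmp[i] is always in range here, so tmp.getD i 0 is exact for Python's tmp[i])
def roundA (tmp : List Int) : List Int :=
  (List.range tmp.length).foldl
    (fun new_arr i =>
      let v := tmp.getD i 0
      if 50 ≤ v ∧ PySem.Int.mod v 2 = 0 then new_arr.set i (PySem.Int.floordiv v 2)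
      else if v < 50 ∧ PySem.Int.mod v 2 ≠ 0 then new_arr.set i (v * 2 + 1)
      else new_arr)
    tmp

-- A's 'while True' loop (fuel only for totality)
def loopA : Nat → Int → List Int → Int
  | 0, answer, _ => answer
  | fuel + 1, answer, tmp =>
      let new_arr := roundA tmp
      if new_arr = tmp then answer
      else loopA fuel (answer + 1) new_arr

def solution (arr : List Int) : Int := loopA 100 0 arr

-- ===== PORT B =====
-- Source B's helper step(x)
def stepB (x : Int) : Int :=
  if 50 ≤ x ∧ PySem.Int.mod x 2 = 0 then PySem.Int.floordiv x 2
  else if x < 50 ∧ PySem.Int.mod x 2 ≠ 0 then 2 * x + 1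
  else x

-- Source B's inner 'while step(x) != x' counting loop (fuel only for totality)
def countB : Nat → Int → Int → Int
  | 0, _, s => s
  | fuel + 1, x, s => if stepB x = x then s else countB fuel (stepB x) (s + 1)

def solution_alt (arr : List Int) : Int :=
  arr.foldl (fun best x => max best (countB 100 x 0)) 0

-- ===== PRECONDITION & SPEC =====
def Spec_solution (arr : List Int) (out : Int) : Prop := out = solution_alt arr
instance (arr : List Int) (out : Int) : Decidable (Spec_solution arr out) := by unfold Spec_solution; infer_instance

-- ===== CLAIM (what is proved, stated in full; the proofs are below) =====
def Claim_equal_solution : Prop := ∀ (arr : List Int), Dom_solution arr → Spec_solution arr (solution arr)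

-- ===== LEMMAS AND PROOFS =====

-- the step function of A's loop body, named for the proofs (definitionally the lambda in roundA)
def fA (tmp : List Int) (new_arr : List Int) (i : Nat) : List Int :=
  if 50 ≤ tmp.getD i 0 ∧ PySem.Int.mod (tmp.getD i 0) 2 = 0 then
    new_arr.set i (PySem.Int.floordiv (tmp.getD i 0) 2)
  else if tmp.getD i 0 < 50 ∧ PySem.Int.mod (tmp.getD i 0) 2 ≠ 0 then
    new_arr.set i (tmp.getD i 0 * 2 + 1)
  else new_arr

theorem roundA_def (tmp : List Int) :
    roundA tmp = (List.range tmp.length).foldl (fA tmp) tmp := rfl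

theorem fA_length (tmp l : List Int) (i : Nat) : (fA tmp l i).length = l.length := by
  unfold fA
  split_ifs <;> simp

theorem fA_getD_ne (tmp l : List Int) (i j : Nat) (hij : i ≠ j) :
    (fA tmp l i).getD j 0 = l.getD j 0 := by
  unfold fA
  split_ifs <;> simp [List.getD, List.getElem?_set_ne hij]

theorem fA_getD_self (tmp l : List Int) (i : Nat) (hlen : l.length = tmp.length)
    (hi : i < tmp.length) (hcur : l.getD i 0 = tmp.getD i 0) :
    (fA tmp l i).getD i 0 = stepB (tmp.getD i 0) := by
  have hil : i < l.length := by omega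
  unfold fA stepB
  split_ifs with h1 h2
  · simp only [List.getD, List.getElem?_set_self hil, Option.getD_some]
  · simp only [List.getD, List.getElem?_set_self hil, Option.getD_some]
    ring
  · exact hcur

theorem roundA_inv (tmp : List Int) (n : Nat) (hn : n ≤ tmp.length) :
    ((List.range n).foldl (fA tmp) tmp).length = tmp.length ∧
    ∀ j : Nat, ((List.range n).foldl (fA tmp) tmp).getD j 0 =
      if j < n then stepB (tmp.getD j 0) else tmp.getD j 0 := by
  induction n with
  | zero => simp
  | succ n ih =>
      obtain ⟨hlen, hget⟩ := ih (by omega)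
      rw [List.range_succ, List.foldl_append, List.foldl_cons, List.foldl_nil]
      refine ⟨by rw [fA_length, hlen], ?_⟩
      intro j
      by_cases hj : j = n
      · subst hj
        rw [if_pos (by omega)]
        exact fA_getD_self tmp _ j hlen (by omega) (by rw [hget j, if_neg (by omega)])
      · rw [fA_getD_ne tmp _ n j (Ne.symm hj), hget j]
        by_cases h : j < n
        · rw [if_pos h, if_pos (by omega)]
        · rw [if_neg h, if_neg (by omega)]

theorem roundA_eq_map (tmp : List Int) : roundA tmp = tmp.map stepB := by
  obtain ⟨hlen, hget⟩ := roundA_inv tmp tmp.length (le_refl _)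
  rw [roundA_def]
  apply List.ext_getElem
  · rw [hlen, List.length_map]
  · intro j h1 h2
    have hj : j < tmp.length := by simpa using h2
    have := hget j
    rw [if_pos hj, List.getD_eq_getElem _ _ h1, List.getD_eq_getElem _ _ hj] at this
    rw [this]
    simp

-- the 'max of' fold, abstracted over the per-element score g
def Fmax (g : Int → Int) (a : Int) (l : List Int) : Int :=
  l.foldl (fun b x => max b (g x)) a

theorem Fmax_hoist (g : Int → Int) (a b : Int) (l : List Int) :
    Fmax g (max a b) l = max a (Fmax g b l) := by
  induction l generalizing b with
  | nil => rfl
  | cons y l ih =>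
      simp only [Fmax, List.foldl_cons] at *
      rw [max_assoc]
      exact ih (max b (g y))

theorem Fmax_cons (g : Int → Int) (y : Int) (l : List Int) :
    Fmax g 0 (y :: l) = max (g y) (Fmax g 0 l) := by
  have h := Fmax_hoist g (g y) 0 l
  simp only [Fmax, List.foldl_cons] at *
  rw [max_comm (0 : Int) (g y)]
  exact h

theorem Fmax_le (g : Int → Int) (a : Int) (l : List Int) : a ≤ Fmax g a l := by
  induction l generalizing a with
  | nil => exact le_refl a
  | cons y l ih => exact le_trans (le_max_left a (g y)) (ih _)

theorem Fmax_zero (g : Int → Int) (l : List Int) (h : ∀ x ∈ l, g x = 0) :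
    Fmax g 0 l = 0 := by
  induction l with
  | nil => rfl
  | cons y l ih =>
      rw [Fmax_cons, h y (by simp), ih (fun x hx => h x (by simp [hx]))]
      simp

-- countB's accumulator shift
theorem countB_shift (fuel : Nat) (x s : Int) :
    countB fuel x s = s + countB fuel x 0 := by
  induction fuel generalizing x s with
  | zero => simp [countB]
  | succ fuel ih =>
      by_cases h : stepB x = x
      · simp [countB, h]
      · simp only [countB, if_neg h]
        rw [ih (stepB x) (s + 1), ih (stepB x) (0 + 1)]
        ring

theorem countB_nonneg (fuel : Nat) (x : Int) : 0 ≤ countB fuel x 0 := by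
  induction fuel generalizing x with
  | zero => simp [countB]
  | succ fuel ih =>
      by_cases h : stepB x = x
      · simp [countB, h]
      · simp only [countB, if_neg h]
        rw [countB_shift]
        have := ih (stepB x)
        omega

theorem countB_fix (fuel : Nat) (x : Int) (h : stepB x = x) : countB fuel x 0 = 0 := by
  cases fuel with
  | zero => rfl
  | succ fuel => simp [countB, h]

theorem countB_succ (fuel : Nat) (x : Int) :
    countB (fuel + 1) x 0 = if stepB x = x then 0 else 1 + countB fuel (stepB x) 0 := by
  by_cases h : stepB x = x
  · simp [countB, h]
  · simp only [countB, if_neg h]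
    rw [countB_shift]
    ring

-- loopA's accumulator shift
theorem loopA_shift (fuel : Nat) (a : Int) (tmp : List Int) :
    loopA fuel a tmp = a + loopA fuel 0 tmp := by
  induction fuel generalizing a tmp with
  | zero => simp [loopA]
  | succ fuel ih =>
      simp only [loopA]
      by_cases h : roundA tmp = tmp
      · simp [h]
      · simp only [if_neg h]
        rw [ih (a + 1), ih (0 + 1)]
        ring

-- the key combinatorial step: making one round of progress adds 1 to the max
theorem Fmax_step (l : List Int) (c c' : Int → Int)
    (hc : ∀ x, 0 ≤ c x)
    (hfix : ∀ x, stepB x = x → c x = 0)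
    (hrel : ∀ x, c' x = if stepB x = x then 0 else 1 + c x)
    (hex : ∃ x ∈ l, stepB x ≠ x) :
    Fmax c' 0 l = 1 + Fmax c 0 l := by
  induction l with
  | nil => simp at hex
  | cons y l ih =>
      rw [Fmax_cons, Fmax_cons]
      by_cases hl : ∃ x ∈ l, stepB x ≠ x
      · rw [ih hl]
        by_cases hy : stepB y = y
        · rw [hrel y, if_pos hy, hfix y hy]
          have h0 : (0 : Int) ≤ Fmax c 0 l := Fmax_le c 0 l
          omega
        · rw [hrel y, if_neg hy]
          omega
      · push_neg at hl
        have hze : ∀ x ∈ l, c' x = 0 := by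
          intro x hx
          rw [hrel x, if_pos (hl x hx)]
        have hzc : ∀ x ∈ l, c x = 0 := fun x hx => hfix x (hl x hx)
        rw [Fmax_zero c' l hze, Fmax_zero c l hzc]
        have hy : stepB y ≠ y := by
          rcases hex with ⟨x, hx, hne⟩
          rw [List.mem_cons] at hx
          rcases hx with rfl | hx
          · exact hne
          · exact absurd (hl x hx) hne
        rw [hrel y, if_neg hy]
        have := hc y
        omega

-- map f l = l  ↔  every element is fixed
theorem map_eq_self (f : Int → Int) (l : List Int) :
    l.map f = l ↔ ∀ x ∈ l, f x = x := by
  induction l with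
  | nil => simp
  | cons y l ih =>
      simp only [List.map_cons, List.cons.injEq, ih, List.mem_cons]
      constructor
      · rintro ⟨h1, h2⟩ x hx
        rcases hx with rfl | hx
        · exact h1
        · exact h2 x hx
      · intro h
        exact ⟨h y (Or.inl rfl), fun x hx => h x (Or.inr hx)⟩

-- main equivalence, for any common fuel
theorem loopA_eq_fold (fuel : Nat) (tmp : List Int) :
    loopA fuel 0 tmp = Fmax (fun x => countB fuel x 0) 0 tmp := by
  induction fuel generalizing tmp with
  | zero =>
      simp only [loopA]
      rw [Fmax_zero]
      intro x _
      rfl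
  | succ fuel ih =>
      simp only [loopA, roundA_eq_map]
      by_cases h : tmp.map stepB = tmp
      · rw [if_pos h, Fmax_zero]
        intro x hx
        exact countB_fix _ x ((map_eq_self stepB tmp).mp h x hx)
      · rw [if_neg h, loopA_shift, ih (tmp.map stepB)]
        have hmap : Fmax (fun x => countB fuel x 0) 0 (tmp.map stepB)
            = Fmax (fun x => countB fuel (stepB x) 0) 0 tmp := by
          simp [Fmax, List.foldl_map]
        rw [hmap]
        have hex : ∃ x ∈ tmp, stepB x ≠ x := by
          by_contra hc
          push_neg at hc
          exact h ((map_eq_self stepB tmp).mpr hc)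
        rw [Fmax_step tmp (fun x => countB fuel (stepB x) 0)
              (fun x => countB (fuel + 1) x 0)
              (fun x => countB_nonneg fuel (stepB x))
              (fun x hx => show countB fuel (stepB x) 0 = 0 by
                rw [hx]; exact countB_fix fuel x hx)
              (fun x => countB_succ fuel x) hex]
        omega

-- ===== VERDICT (by name: the statement is the Claim_ definition above) =====
theorem solution_spec : Claim_equal_solution := by
  intro arr _
  unfold Spec_solution solution solution_alt
  rw [loopA_eq_fold 100 arr]
  rfl
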